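-- pv_equiv track=rewrite | github.com/cloudmosquito/Chinese_checkers_robot | game/chinese_checkers_app.py | create_array_between
-- ===== SOURCE A (Python) =====
-- def create_array_between(q1,r1, q2,r2):
--     ans = []
--     if q1 == q2:
--         if r1 > r2:
--             r1, r2 = r2, r1
--         ans.extend([(q1, r) for r in list(range(r1 + 1, r2))])
--     elif r1 == r2:
--         if q1 > q2:
--             q1, q2 = q2, q1
--         ans.extend([(q, r1) for q in list(range(q1 + 1, q2))])
--     elif q1 + r1 == q2 + r2:
--         sum = q1 + r1
--         if r1 > r2:
--             r1, r2 = r2, r1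
--         ans.extend([(sum - r, r) for r in list(range(r1 + 1, r2))])
--     else:
--         raise ValueError("The two positions are not on a line.")
--     return ans
-- ===== SOURCE B (Python) =====
-- def create_array_between(q1, r1, q2, r2):
--     if q1 != q2 and r1 != r2 and q1 + r1 != q2 + r2:
--         raise ValueError("The two positions are not on a line.")
--     dq, dr = q2 - q1, r2 - r1
--     dist = max(abs(dq), abs(dr), abs(dq + dr))
--     if dist == 0:
--         return []
--     if (r2, q2) < (r1, q1):
--         q1, r1, q2, r2 = q2, r2, q1, r1
--     sq, sr = (q2 - q1) // dist, (r2 - r1) // dist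
--     return [(q1 + sq * i, r1 + sr * i) for i in range(1, dist)]
-- ===== Notes on version B (the rewrite author's own statement) =====
-- stated objective: simpler
-- what changed: Replaces A's three copy-pasted per-direction branch loops by one generic traversal: validate collinearity, order the endpoints canonically by (r, q), derive the unit step by exact division, and emit the interior cells in a single comprehension.
import Mathlib
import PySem

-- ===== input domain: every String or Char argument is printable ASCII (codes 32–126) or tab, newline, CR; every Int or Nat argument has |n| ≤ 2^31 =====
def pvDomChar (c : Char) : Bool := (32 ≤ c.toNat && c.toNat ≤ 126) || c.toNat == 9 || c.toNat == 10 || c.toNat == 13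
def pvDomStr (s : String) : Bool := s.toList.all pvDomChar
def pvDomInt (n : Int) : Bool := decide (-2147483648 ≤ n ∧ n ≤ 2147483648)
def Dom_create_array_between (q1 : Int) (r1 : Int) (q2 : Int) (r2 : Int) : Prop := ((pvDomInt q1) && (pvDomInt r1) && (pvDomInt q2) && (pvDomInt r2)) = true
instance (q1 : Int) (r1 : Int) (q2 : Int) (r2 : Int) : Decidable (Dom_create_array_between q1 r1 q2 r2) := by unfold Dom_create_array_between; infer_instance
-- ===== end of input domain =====

-- B replaces A's three copy-pasted branch loops by one generic traversal: validate collinearity,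
-- canonically order the endpoints by (r, q), derive the unit step, and emit the interior points
-- in a single comprehension (objective: simpler, same cost).

-- ===== PORT A =====
def create_array_between (q1 : Int) (r1 : Int) (q2 : Int) (r2 : Int) : List (Int × Int) :=
  if q1 = q2 then
    let p := if r1 > r2 then (r2, r1) else (r1, r2)
    (PySem.List.pyRange (p.1 + 1) p.2 1).map (fun r => (q1, r))
  else if r1 = r2 then
    let p := if q1 > q2 then (q2, q1) else (q1, q2)
    (PySem.List.pyRange (p.1 + 1) p.2 1).map (fun q => (q, r1))
  else if q1 + r1 = q2 + r2 then
    let s := q1 + r1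
    let p := if r1 > r2 then (r2, r1) else (r1, r2)
    (PySem.List.pyRange (p.1 + 1) p.2 1).map (fun r => (s - r, r))
  else []  -- raise ValueError("The two positions are not on a line."): excluded by Pre_

-- ===== PORT B =====
def create_array_between_alt (q1 : Int) (r1 : Int) (q2 : Int) (r2 : Int) : List (Int × Int) :=
  if q1 ≠ q2 ∧ r1 ≠ r2 ∧ q1 + r1 ≠ q2 + r2 then
    []  -- raise ValueError("The two positions are not on a line."): excluded by Pre_
  else
    let dq := q2 - q1
    let dr := r2 - r1
    let dist := max (max |dq| |dr|) |dq + dr|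
    if dist = 0 then []
    else
      -- Python tuple comparison (r2, q2) < (r1, q1), written out lexicographically (exact)
      let p := if r2 < r1 ∨ (r2 = r1 ∧ q2 < q1) then (q2, r2, q1, r1) else (q1, r1, q2, r2)
      let a1 := p.1; let b1 := p.2.1; let a2 := p.2.2.1; let b2 := p.2.2.2
      let sq := PySem.Int.floordiv (a2 - a1) dist
      let sr := PySem.Int.floordiv (b2 - b1) dist
      (PySem.List.pyRange 1 dist 1).map (fun i => (a1 + sq * i, b1 + sr * i))

-- ===== PRECONDITION & SPEC =====
-- A raises ValueError exactly when the two points are not axially collinear; Pre_ admits the collinear inputs.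
def Pre_create_array_between (q1 : Int) (r1 : Int) (q2 : Int) (r2 : Int) : Prop :=
  q1 = q2 ∨ r1 = r2 ∨ q1 + r1 = q2 + r2
instance (q1 : Int) (r1 : Int) (q2 : Int) (r2 : Int) : Decidable (Pre_create_array_between q1 r1 q2 r2) := by unfold Pre_create_array_between; infer_instance
def pvWitness_create_array_between : Int × Int × Int × Int := (2, 5, 2, 1)

def Spec_create_array_between (q1 : Int) (r1 : Int) (q2 : Int) (r2 : Int) (out : List (Int × Int)) : Prop := out = create_array_between_alt q1 r1 q2 r2
instance (q1 : Int) (r1 : Int) (q2 : Int) (r2 : Int) (out : List (Int × Int)) : Decidable (Spec_create_array_between q1 r1 q2 r2 out) := by unfold Spec_create_array_between; infer_instance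

-- ===== CLAIM (what is proved, stated in full; the proofs are below) =====
def Claim_equal_create_array_between : Prop := ∀ (q1 : Int) (r1 : Int) (q2 : Int) (r2 : Int), Dom_create_array_between q1 r1 q2 r2 → Pre_create_array_between q1 r1 q2 r2 → Spec_create_array_between q1 r1 q2 r2 (create_array_between q1 r1 q2 r2)

-- ===== LEMMAS AND PROOFS =====

-- affine images of two integer ranges coincide when lengths match and the maps agree pointwise
theorem map_pyRange_eq {b1 : Type} (f g : Int → b1) (a b c d : Int)
    (hlen : (b - a).toNat = (d - c).toNat)
    (h : ∀ k : Nat, k < (b - a).toNat → f (a + k) = g (c + k)) :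
    (PySem.List.pyRange a b 1).map f = (PySem.List.pyRange c d 1).map g := by
  rw [PySem.List.pyRange_one, PySem.List.pyRange_one, List.map_map, List.map_map, ← hlen]
  exact List.map_congr_left (fun k hk => h k (List.mem_range.mp hk))

theorem fd_zero (d : Int) (hd : 0 < d) : PySem.Int.floordiv 0 d = 0 := by
  rw [PySem.Int.floordiv_eq_ediv_of_pos hd]; simp

theorem fd_self (d : Int) (hd : 0 < d) : PySem.Int.floordiv d d = 1 := by
  rw [PySem.Int.floordiv_eq_ediv_of_pos hd]; exact Int.ediv_self (by omega)

theorem fd_neg_self (d : Int) (hd : 0 < d) : PySem.Int.floordiv (-d) d = -1 := by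
  rw [PySem.Int.floordiv_eq_ediv_of_pos hd, show (-d) = (-1) * d by ring]
  exact Int.mul_ediv_cancel _ (by omega)

theorem create_array_between_spec : Claim_equal_create_array_between := by
  intro q1 r1 q2 r2 _ hpre
  unfold Pre_create_array_between at hpre
  unfold Spec_create_array_between create_array_between create_array_between_alt
  by_cases hq : q1 = q2
  · subst hq
    rw [if_pos rfl]
    rcases lt_trichotomy r1 r2 with hr | hr | hr
    · rw [if_neg (by omega : ¬ r1 > r2), if_neg (show ¬(q1 ≠ q1 ∧ r1 ≠ r2 ∧ q1 + r1 ≠ q1 + r2) by simp)]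
      simp only []
      have e1 : |q1 - q1| = (0 : Int) := by simp
      have e2 : |r2 - r1| = r2 - r1 := abs_of_pos (by omega)
      have e3 : |q1 - q1 + (r2 - r1)| = r2 - r1 := by rw [abs_of_pos (by omega)]; ring
      rw [e1, e2, e3, max_eq_right (by omega : (0:Int) ≤ r2 - r1), max_self, if_neg (by omega), if_neg (by omega)]
      simp only []
      have hsq : PySem.Int.floordiv (q1 - q1) (r2 - r1) = 0 := by
        rw [show q1 - q1 = (0:Int) by ring]; exact fd_zero _ (by omega)
      rw [hsq, fd_self _ (by omega : (0:Int) < r2 - r1)]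
      exact map_pyRange_eq _ _ _ _ _ _ (by omega) (fun k hk => by
        simp only [Prod.mk.injEq]; constructor <;> ring)
    · subst hr
      rw [if_neg (by omega : ¬ r1 > r1), if_neg (show ¬(q1 ≠ q1 ∧ r1 ≠ r1 ∧ q1 + r1 ≠ q1 + r1) by simp)]
      simp only []
      have hd : max (max |q1 - q1| |r1 - r1|) |q1 - q1 + (r1 - r1)| = (0:Int) := by simp
      rw [hd, if_pos rfl, PySem.List.pyRange_one_eq_nil (by omega), List.map_nil]
    · rw [if_pos (by omega : r1 > r2), if_neg (show ¬(q1 ≠ q1 ∧ r1 ≠ r2 ∧ q1 + r1 ≠ q1 + r2) by simp)]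
      simp only []
      have e1 : |q1 - q1| = (0 : Int) := by simp
      have e2 : |r2 - r1| = r1 - r2 := by rw [abs_of_neg (by omega : (r2 - r1 : Int) < 0)]; ring
      have e3 : |q1 - q1 + (r2 - r1)| = r1 - r2 := by rw [abs_of_neg (by omega)]; ring
      rw [e1, e2, e3, max_eq_right (by omega : (0:Int) ≤ r1 - r2), max_self, if_neg (by omega),
          if_pos (Or.inl hr)]
      simp only []
      have hsq : PySem.Int.floordiv (q1 - q1) (r1 - r2) = 0 := by
        rw [show q1 - q1 = (0:Int) by ring]; exact fd_zero _ (by omega)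
      rw [hsq, fd_self _ (by omega : (0:Int) < r1 - r2)]
      exact map_pyRange_eq _ _ _ _ _ _ (by omega) (fun k hk => by
        simp only [Prod.mk.injEq]; constructor <;> ring)
  · rw [if_neg hq]
    by_cases hrr : r1 = r2
    · subst hrr
      rw [if_pos rfl]
      rcases lt_trichotomy q1 q2 with hqq | hqq | hqq
      · rw [if_neg (by omega : ¬ q1 > q2), if_neg (show ¬(q1 ≠ q2 ∧ r1 ≠ r1 ∧ q1 + r1 ≠ q2 + r1) by simp)]
        simp only []
        have e1 : |q2 - q1| = q2 - q1 := abs_of_pos (by omega)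
        have e2 : |r1 - r1| = (0 : Int) := by simp
        have e3 : |q2 - q1 + (r1 - r1)| = q2 - q1 := by rw [abs_of_pos (by omega)]; ring
        rw [e1, e2, e3, max_eq_left (by omega : (0:Int) ≤ q2 - q1), max_self, if_neg (by omega),
            if_neg (by omega)]
        simp only []
        have hsr : PySem.Int.floordiv (r1 - r1) (q2 - q1) = 0 := by
          rw [show r1 - r1 = (0:Int) by ring]; exact fd_zero _ (by omega)
        rw [hsr, fd_self _ (by omega : (0:Int) < q2 - q1)]
        exact map_pyRange_eq _ _ _ _ _ _ (by omega) (fun k hk => by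
          simp only [Prod.mk.injEq]; constructor <;> ring)
      · exact absurd hqq hq
      · rw [if_pos (by omega : q1 > q2), if_neg (show ¬(q1 ≠ q2 ∧ r1 ≠ r1 ∧ q1 + r1 ≠ q2 + r1) by simp)]
        simp only []
        have e1 : |q2 - q1| = q1 - q2 := by rw [abs_of_neg (by omega : (q2 - q1 : Int) < 0)]; ring
        have e2 : |r1 - r1| = (0 : Int) := by simp
        have e3 : |q2 - q1 + (r1 - r1)| = q1 - q2 := by rw [abs_of_neg (by omega)]; ring
        rw [e1, e2, e3, max_eq_left (by omega : (0:Int) ≤ q1 - q2), max_self, if_neg (by omega),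
            if_pos (by tauto)]
        simp only []
        have hsr : PySem.Int.floordiv (r1 - r1) (q1 - q2) = 0 := by
          rw [show r1 - r1 = (0:Int) by ring]; exact fd_zero _ (by omega)
        rw [hsr, fd_self _ (by omega : (0:Int) < q1 - q2)]
        exact map_pyRange_eq _ _ _ _ _ _ (by omega) (fun k hk => by
          simp only [Prod.mk.injEq]; constructor <;> ring)
    · have hsum : q1 + r1 = q2 + r2 := by tauto
      rw [if_neg hrr, if_pos hsum]
      rcases lt_trichotomy r1 r2 with hr | hr | hr
      · rw [if_neg (by omega : ¬ r1 > r2), if_neg (show ¬(q1 ≠ q2 ∧ r1 ≠ r2 ∧ q1 + r1 ≠ q2 + r2) by tauto)]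
        simp only []
        have e1 : |q2 - q1| = r2 - r1 := by rw [abs_of_neg (by omega : (q2 - q1 : Int) < 0)]; omega
        have e2 : |r2 - r1| = r2 - r1 := abs_of_pos (by omega)
        have e3 : |q2 - q1 + (r2 - r1)| = (0 : Int) := by
          rw [show q2 - q1 + (r2 - r1) = (0:Int) by omega]; simp
        rw [e1, e2, e3, max_self, max_eq_left (by omega : (0:Int) ≤ r2 - r1), if_neg (by omega),
            if_neg (by omega)]
        simp only []
        have hsq : PySem.Int.floordiv (q2 - q1) (r2 - r1) = -1 := by
          rw [show q2 - q1 = -(r2 - r1) by omega]; exact fd_neg_self _ (by omega)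
        rw [hsq, fd_self _ (by omega : (0:Int) < r2 - r1)]
        exact map_pyRange_eq _ _ _ _ _ _ (by omega) (fun k hk => by
          simp only [Prod.mk.injEq]; constructor <;> omega)
      · exact absurd hr hrr
      · rw [if_pos (by omega : r1 > r2), if_neg (show ¬(q1 ≠ q2 ∧ r1 ≠ r2 ∧ q1 + r1 ≠ q2 + r2) by tauto)]
        simp only []
        have e1 : |q2 - q1| = r1 - r2 := by rw [abs_of_pos (by omega : (0:Int) < q2 - q1)]; omega
        have e2 : |r2 - r1| = r1 - r2 := by rw [abs_of_neg (by omega : (r2 - r1 : Int) < 0)]; ring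
        have e3 : |q2 - q1 + (r2 - r1)| = (0 : Int) := by
          rw [show q2 - q1 + (r2 - r1) = (0:Int) by omega]; simp
        rw [e1, e2, e3, max_self, max_eq_left (by omega : (0:Int) ≤ r1 - r2), if_neg (by omega),
            if_pos (Or.inl hr)]
        simp only []
        have hsq : PySem.Int.floordiv (q1 - q2) (r1 - r2) = -1 := by
          rw [show q1 - q2 = -(r1 - r2) by omega]; exact fd_neg_self _ (by omega)
        rw [hsq, fd_self _ (by omega : (0:Int) < r1 - r2)]
        exact map_pyRange_eq _ _ _ _ _ _ (by omega) (fun k hk => by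
          simp only [Prod.mk.injEq]; constructor <;> omega)
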